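-- pv_equiv track=rewrite | github.com/dodo146/ENS491-Basic-Block | utils.py | is_hex
-- ===== SOURCE A (Python) =====
-- import string
--
-- def is_hex(s):
--     k = s
--     if k == "":
--         return False
--     else:
--         if k[:2] == "0x":
--             k = k[2:]
--         return all(c in string.hexdigits for c in k)
-- ===== SOURCE B (Python) =====
-- def is_hex(s):
--     # One-pass DFA: states 0=start, 1=seen leading '0', 2=plain hex body,
--     # 3=inside body after the lowercase zero-x prefix; prefix handling is folded into the
--     # automaton instead of slicing, digit test is by character ranges.
--     state = 0
--     for c in s:
--         d = '0' <= c <= '9' or 'a' <= c <= 'f' or 'A' <= c <= 'F'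
--         if state == 0:
--             state = 1 if c == '0' else (2 if d else -1)
--         elif state == 1:
--             state = 3 if c == 'x' else (2 if d else -1)
--         else:
--             state = state if d else -1
--         if state < 0:
--             return False
--     return state != 0
-- ===== Notes on version B (the rewrite author's own statement) =====
-- stated objective: alternative
-- what changed: B replaces A's prefix-slice plus all()-membership scan over string.hexdigits by a single-pass finite-state automaton whose states fold the optional lowercase zero-x prefix into the traversal and whose digit test uses character-range comparisons instead of membership in a digit string.
import Mathlib
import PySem

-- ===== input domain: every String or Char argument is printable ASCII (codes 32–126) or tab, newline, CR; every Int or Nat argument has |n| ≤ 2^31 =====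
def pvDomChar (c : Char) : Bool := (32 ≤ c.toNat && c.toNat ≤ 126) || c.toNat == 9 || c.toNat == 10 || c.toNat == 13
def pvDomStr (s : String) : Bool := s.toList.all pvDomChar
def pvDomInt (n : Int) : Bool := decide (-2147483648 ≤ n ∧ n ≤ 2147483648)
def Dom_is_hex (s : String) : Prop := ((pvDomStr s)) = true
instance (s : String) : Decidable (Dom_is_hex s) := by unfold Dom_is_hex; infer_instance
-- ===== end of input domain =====

-- B runs a one-pass finite-state automaton (the optional lowercase zero-x prefix folded into the
-- states, range-test digits) instead of A's prefix slice plus per-character membership scan; same cost.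

def pvHexdigits : String := "0123456789abcdefABCDEF"

-- ===== PORT A =====
def is_hex (s : String) : Bool :=
  let k := s
  if k = "" then false
  else
    let k := if PySem.Str.slice k none (some 2) = "0x" then PySem.Str.slice k (some 2) none else k
    k.toList.all (fun c => PySem.Str.isIn (String.ofList [c]) pvHexdigits)

-- ===== PORT B =====
def isHexDigitB (c : Char) : Bool :=
  ('0' ≤ c && c ≤ '9') || ('a' ≤ c && c ≤ 'f') || ('A' ≤ c && c ≤ 'F')

-- the for-loop of Source B with its early `return False`, as structural recursion on the chars
def dfaRun (st : Int) : List Char → Bool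
  | [] => st != 0
  | c :: cs =>
    let d := isHexDigitB c
    let st' : Int :=
      if st == 0 then (if c == '0' then 1 else if d then 2 else -1)
      else if st == 1 then (if c == 'x' then 3 else if d then 2 else -1)
      else (if d then st else -1)
    if st' < 0 then false else dfaRun st' cs

def is_hex_alt (s : String) : Bool := dfaRun 0 s.toList

-- ===== PRECONDITION & SPEC =====
def Spec_is_hex (s : String) (out : Bool) : Prop := out = is_hex_alt s
instance (s : String) (out : Bool) : Decidable (Spec_is_hex s out) := by unfold Spec_is_hex; infer_instance

-- ===== CLAIM (what is proved, stated in full; the proofs are below) =====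
def Claim_equal_is_hex : Prop := ∀ (s : String), Dom_is_hex s → Spec_is_hex s (is_hex s)

-- ===== LEMMAS AND PROOFS =====

-- singleton-substring membership is character membership
theorem isIn_singleton (c : Char) (h : List Char) :
    PySem.Chars.isIn [c] h = h.contains c := by
  by_cases hm : c ∈ h
  · obtain ⟨l1, l2, rfl⟩ := List.append_of_mem hm
    have hinf : [c] <:+: (l1 ++ c :: l2) := ⟨l1, l2, by simp⟩
    simp [(PySem.Chars.isIn_iff_infix [c] _).2 hinf]
  · rw [(PySem.Chars.isIn_eq_false_iff [c] h).2 (fun hinf => hm (hinf.subset (by simp)))]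
    simp [hm]

theorem char_le_iff (c d : Char) : (c ≤ d) ↔ c.toNat ≤ d.toNat := by
  rw [Char.le_def, UInt32.le_iff_toNat_le, Char.toNat_val, Char.toNat_val]

theorem char_eq_iff (c d : Char) : (c = d) ↔ c.toNat = d.toNat := by
  rw [Char.ext_iff, ← UInt32.toNat_inj, Char.toNat_val, Char.toNat_val]

-- A's per-character membership test agrees with B's range test
theorem hexChar_eq (c : Char) :
    PySem.Chars.isIn [c] pvHexdigits.toList = isHexDigitB c := by
  rw [isIn_singleton]
  have hl : pvHexdigits.toList =
      ['0','1','2','3','4','5','6','7','8','9','a','b','c','d','e','f',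
       'A','B','C','D','E','F'] := by decide
  rw [hl, Bool.eq_iff_iff]
  simp only [List.contains_eq_mem, decide_eq_true_eq, List.mem_cons, List.not_mem_nil,
    or_false, isHexDigitB, Bool.or_eq_true, Bool.and_eq_true, decide_eq_true_eq,
    char_eq_iff, char_le_iff]
  simp
  omega

-- in a body state (2 or 3) the automaton just checks all remaining chars
theorem dfaRun_body (st : Int) (hst : st = 2 ∨ st = 3) (l : List Char) :
    dfaRun st l = l.all isHexDigitB := by
  induction l generalizing st with
  | nil => rcases hst with rfl | rfl <;> rfl
  | cons c cs ih =>
    rcases hst with rfl | rfl <;>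
      by_cases hd : isHexDigitB c <;>
      simp [dfaRun, hd, ih 2 (Or.inl rfl), ih 3 (Or.inr rfl)]

-- characterization of the whole automaton from the start state
theorem dfaRun_start (l : List Char) :
    dfaRun 0 l =
      if l = [] then false
      else if l.take 2 = ['0', 'x'] then (l.drop 2).all isHexDigitB
      else l.all isHexDigitB := by
  have h0hex : isHexDigitB '0' = true := by decide
  match l with
  | [] => rfl
  | [c] =>
    by_cases h0 : c = '0'
    · subst h0; simp [dfaRun, h0hex]
    · have hx : ¬ ([c].take 2 = ['0', 'x']) := by simp
      by_cases hd : isHexDigitB c <;>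
        simp [dfaRun, h0, hd]
  | c :: c' :: cs =>
    by_cases h0 : c = '0'
    · subst h0
      by_cases hx : c' = 'x'
      · subst hx
        simp [dfaRun, dfaRun_body 3 (Or.inr rfl)]
      · have htk : ¬ (('0' :: c' :: cs).take 2 = ['0', 'x']) := by simp [hx]
        by_cases hd : isHexDigitB c' <;>
          simp [dfaRun, hx, hd, h0hex, dfaRun_body 2 (Or.inl rfl)]
    · have htk : ¬ ((c :: c' :: cs).take 2 = ['0', 'x']) := by simp [h0]
      by_cases hd : isHexDigitB c <;> by_cases hd2 : isHexDigitB c' <;>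
        simp [dfaRun, h0, hd, hd2, dfaRun_body 2 (Or.inl rfl)]

theorem sliceA_iff (s : String) :
    PySem.Str.slice s none (some 2) = "0x" ↔ s.toList.take 2 = ['0', 'x'] := by
  have hsl : (PySem.Str.slice s none (some 2)).toList = s.toList.take 2 := by
    rw [PySem.Str.toList_slice, PySem.Chars.slice_eq_listSlice,
        PySem.List.slice_to s.toList (by norm_num)]
    rfl
  constructor
  · intro h
    have := congrArg String.toList h
    rw [hsl] at this
    simpa using this
  · intro h
    have h2 : (PySem.Str.slice s none (some 2)).toList = "0x".toList := by
      rw [hsl, h]; rfl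
    have := congrArg String.ofList h2
    simpa using this

theorem string_toList_eq_nil (s : String) : (s = "") ↔ s.toList = [] := by
  constructor
  · intro h; simp [h]
  · intro h
    have := congrArg String.ofList h
    simpa using this

theorem all_hex_eq (l : List Char) :
    (l.all fun c => PySem.Str.isIn (String.ofList [c]) pvHexdigits) = l.all isHexDigitB := by
  simp only [PySem.Str.isIn_eq, String.toList_ofList, hexChar_eq]

-- ===== VERDICT (by name: the statement is the Claim_ definition above) =====
theorem is_hex_spec : Claim_equal_is_hex := by
  intro s _
  unfold Spec_is_hex is_hex is_hex_alt
  rw [dfaRun_start]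
  by_cases hs : s = ""
  · simp [hs]
  · have hnl : ¬ s.toList = [] := fun h => hs ((string_toList_eq_nil s).2 h)
    simp only [hs, if_false, hnl]
    by_cases hp : s.toList.take 2 = ['0', 'x']
    · rw [if_pos ((sliceA_iff s).2 hp), if_pos hp]
      have hdr : (PySem.Str.slice s (some 2) none).toList = s.toList.drop 2 := by
        rw [PySem.Str.toList_slice, PySem.Chars.slice_eq_listSlice,
            PySem.List.slice_from s.toList (by norm_num)]
        rfl
      rw [← hdr] at *
      exact all_hex_eq _
    · rw [if_neg (fun h => hp ((sliceA_iff s).1 h)), if_neg hp]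
      exact all_hex_eq _
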